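-- pv_equiv track=rewrite | github.com/jurejuvuify/jaccard_patterns_visualization | visualize_matches.py | divide_patterns
-- ===== SOURCE A (Python) =====
-- def divide_patterns(patterns):
--    result = []
--    sorted_patterns = sorted(patterns, key=lambda p: len(p[0]), reverse=True)
--
--    for p in sorted_patterns:
--        found_place = False
--        notes, tag, id = p
--        if len(result) > 0:
--            for i in range(len(result)):
--                # todo malo popravi
--                r = result[i]
--                notes_in_result = [ni for n, _, _ in r for ni in n]
--                if all([n not in notes_in_result for n in notes]):
--                    result[i].append(p)
--                    found_place = True
--                    break
--        if not found_place:
--            result.append([p])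
--    return result
-- ===== SOURCE B (Python) =====
-- def divide_patterns(patterns):
--     result = []
--     note2groups = {}  # inverted index: note -> set of group indices containing it
--     for p in sorted(patterns, key=lambda q: len(q[0]), reverse=True):
--         notes = p[0]
--         blocked = set()
--         for n in notes:
--             for g in note2groups.get(n, set()):
--                 blocked.add(g)
--         i = next(j for j in range(len(result) + 1) if j not in blocked)
--         if i < len(result):
--             result[i].append(p)
--         else:
--             result.append([p])
--         for n in notes:
--             note2groups[n] = note2groups.get(n, set()) | {i}
--     return result
-- ===== Notes on version B (the rewrite author's own statement) =====
-- stated objective: faster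
-- what changed: B keeps an inverted index note->set of group indices and derives the blocked-group set directly from the pattern's notes, choosing the first non-blocked index, instead of A's rescan that re-flattens every group's notes for every pattern.
import Mathlib
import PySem

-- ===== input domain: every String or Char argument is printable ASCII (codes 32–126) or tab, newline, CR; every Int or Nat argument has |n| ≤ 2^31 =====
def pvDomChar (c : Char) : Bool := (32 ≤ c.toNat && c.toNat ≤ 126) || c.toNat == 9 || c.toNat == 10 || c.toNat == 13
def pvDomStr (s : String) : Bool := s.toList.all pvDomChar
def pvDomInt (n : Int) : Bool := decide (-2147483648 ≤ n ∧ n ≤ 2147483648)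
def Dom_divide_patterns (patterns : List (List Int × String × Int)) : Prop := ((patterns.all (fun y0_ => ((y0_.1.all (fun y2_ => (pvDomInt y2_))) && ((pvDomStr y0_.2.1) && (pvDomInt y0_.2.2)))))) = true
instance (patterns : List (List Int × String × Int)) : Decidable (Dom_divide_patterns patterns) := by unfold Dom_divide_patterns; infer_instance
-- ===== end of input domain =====

-- B replaces A's per-pattern rescan of every group's flattened notes by an inverted
-- note→group-indices index from which the blocked group set is read off directly (objective: faster).

-- ===== PORT A =====
-- notes_in_result = [ni for n, _, _ in r for ni in n]
def pvFlatNotes (r : List (List Int × String × Int)) : List Int :=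
  r.flatMap (fun q => q.1)

-- A's acceptance test for one group: all([n not in notes_in_result for n in notes])
def pvFits (p : List Int × String × Int) (g : List (List Int × String × Int)) : Bool :=
  let notes_in_result := pvFlatNotes g
  p.1.all (fun n => !(notes_in_result.contains n))

-- the inner 'for i in range(len(result)) … break' loop of A: returns the updated
-- result if some group accepted p (found_place = True), none otherwise
def pvTryPlaceA (p : List Int × String × Int) :
    List (List (List Int × String × Int)) → Option (List (List (List Int × String × Int)))
  | [] => none
  | g :: rest =>
    if pvFits p g then
      some ((g ++ [p]) :: rest)
    else
      (pvTryPlaceA p rest).map (fun rs => g :: rs)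

def divide_patterns (patterns : List (List Int × String × Int)) : List (List (List Int × String × Int)) :=
  let sorted_patterns := PySem.List.sorted patterns (fun q => (q.1.length : Int)) true
  sorted_patterns.foldl
    (fun result p =>
      if result.length > 0 then
        match pvTryPlaceA p result with
        | some r => r
        | none => result ++ [[p]]
      else result ++ [[p]])
    []

-- ===== PORT B =====
def divide_patterns_alt (patterns : List (List Int × String × Int)) : List (List (List Int × String × Int)) :=
  let sorted_patterns := PySem.List.sorted patterns (fun q => (q.1.length : Int)) true
  (sorted_patterns.foldl
    (fun st p =>
      let result := st.1
      let d := st.2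
      let notes := p.1
      -- blocked = {g | n in notes, g in note2groups.get(n, set())}
      let blocked : PySem.Set Nat :=
        notes.foldl (fun b n =>
          (PySem.Dict.getD d n PySem.Set.empty).foldl (fun b2 g => PySem.Set.add b2 g) b)
          PySem.Set.empty
      -- i = next(j for j in range(len(result)+1) if j not in blocked); the generator
      -- always yields (blocked ⊆ range(len(result))), .getD is only a totality default
      let i := ((List.range (result.length + 1)).find?
                  (fun j => !(PySem.Set.contains blocked j))).getD result.length
      let result' := if i < result.length then result.modify i (fun g => g ++ [p]) else result ++ [[p]]
      let d' := notes.foldl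
          (fun dd n => PySem.Dict.insert dd n (PySem.Set.union (PySem.Dict.getD dd n PySem.Set.empty) [i])) d
      (result', d'))
    ([], PySem.Dict.empty)).1

-- ===== PRECONDITION & SPEC =====
def Spec_divide_patterns (patterns : List (List Int × String × Int)) (out : List (List (List Int × String × Int))) : Prop := out = divide_patterns_alt patterns
instance (patterns : List (List Int × String × Int)) (out : List (List (List Int × String × Int))) : Decidable (Spec_divide_patterns patterns out) := by unfold Spec_divide_patterns; infer_instance

-- ===== CLAIM (what is proved, stated in full; the proofs are below) =====
def Claim_equal_divide_patterns : Prop := ∀ (patterns : List (List Int × String × Int)), Dom_divide_patterns patterns → Spec_divide_patterns patterns (divide_patterns patterns)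

-- ===== LEMMAS AND PROOFS =====

-- first index of a fitting group (length if none)
def pvFF (p : List Int × String × Int) : List (List (List Int × String × Int)) → Nat
  | [] => 0
  | g :: rest => if pvFits p g then 0 else pvFF p rest + 1

theorem pvFF_le (p : List Int × String × Int) (res : List (List (List Int × String × Int))) :
    pvFF p res ≤ res.length := by
  induction res with
  | nil => simp [pvFF]
  | cons g rest ih =>
    simp only [pvFF, List.length_cons]
    split <;> omega

theorem pvFF_cons_neg (p : List Int × String × Int) (g : List (List Int × String × Int))
    (rest : List (List (List Int × String × Int))) (hg : pvFits p g = false) :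
    pvFF p (g :: rest) = pvFF p rest + 1 := by
  simp [pvFF, hg]

theorem pvFF_fits (p : List Int × String × Int) (res : List (List (List Int × String × Int)))
    (h : pvFF p res < res.length) : pvFits p (res[pvFF p res]'h) = true := by
  induction res with
  | nil => simp at h
  | cons g rest ih =>
    by_cases hg : pvFits p g = true
    · simp [pvFF, hg]
    · rw [Bool.not_eq_true] at hg
      have hc := pvFF_cons_neg p g rest hg
      have h' : pvFF p rest < rest.length := by
        rw [hc] at h; simpa using h
      have := ih h'
      simp only [hc, List.getElem_cons_succ]
      exact this

theorem pvFF_min (p : List Int × String × Int) (res : List (List (List Int × String × Int)))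
    (j : Nat) (hj : j < pvFF p res) (hjl : j < res.length) : pvFits p (res[j]'hjl) = false := by
  induction res generalizing j with
  | nil => simp at hjl
  | cons g rest ih =>
    by_cases hg : pvFits p g = true
    · simp [pvFF, hg] at hj
    · rw [Bool.not_eq_true] at hg
      have hc := pvFF_cons_neg p g rest hg
      cases j with
      | zero => simpa using hg
      | succ j' =>
        rw [hc] at hj
        simpa using ih j' (by omega) (by simpa using hjl)

-- A's inner loop, characterised by the first fitting index
theorem tryPlaceA_eq (p : List Int × String × Int) (res : List (List (List Int × String × Int))) :
    pvTryPlaceA p res =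
      if pvFF p res < res.length then some (res.modify (pvFF p res) (fun g => g ++ [p])) else none := by
  induction res with
  | nil => simp [pvTryPlaceA]
  | cons g rest ih =>
    by_cases hg : pvFits p g = true
    · simp [pvTryPlaceA, pvFF, hg, List.modify_cons]
    · rw [Bool.not_eq_true] at hg
      have hc := pvFF_cons_neg p g rest hg
      simp only [pvTryPlaceA, hg, Bool.false_eq_true, if_false, ih, hc]
      by_cases h : pvFF p rest < rest.length
      · simp [h]
      · simp [h]

-- the invariant: d is the inverted index of res
def pvInv (d : PySem.Dict Int (PySem.Set Nat)) (res : List (List (List Int × String × Int))) : Prop :=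
  ∀ (n : Int) (j : Nat), j ∈ PySem.Dict.getD d n PySem.Set.empty ↔
    ∃ h : j < res.length, n ∈ pvFlatNotes (res[j]'h)

theorem mem_foldl_update (f : Int → PySem.Set Nat) (notes : List Int) (b0 : PySem.Set Nat) (j : Nat) :
    (j ∈ notes.foldl (fun b n => PySem.Set.update b (f n)) b0) ↔
      j ∈ b0 ∨ ∃ n ∈ notes, j ∈ f n := by
  induction notes generalizing b0 with
  | nil => simp
  | cons n rest ih =>
    simp only [List.foldl_cons, ih, PySem.Set.mem_update, List.mem_cons]
    constructor
    · rintro ((h | h) | ⟨m, hm, hj⟩)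
      · exact Or.inl h
      · exact Or.inr ⟨n, Or.inl rfl, h⟩
      · exact Or.inr ⟨m, Or.inr hm, hj⟩
    · rintro (h | ⟨m, (rfl | hm), hj⟩)
      · exact Or.inl (Or.inl h)
      · exact Or.inl (Or.inr hj)
      · exact Or.inr ⟨m, hm, hj⟩

-- membership in B's blocked set
theorem mem_blocked (d : PySem.Dict Int (PySem.Set Nat)) (notes : List Int) (b0 : PySem.Set Nat) (j : Nat) :
    (j ∈ notes.foldl (fun b n =>
        (PySem.Dict.getD d n PySem.Set.empty).foldl (fun b2 g => PySem.Set.add b2 g) b) b0) ↔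
      j ∈ b0 ∨ ∃ n ∈ notes, j ∈ PySem.Dict.getD d n PySem.Set.empty := by
  have hfun : (fun (b : PySem.Set Nat) (n : Int) =>
      (PySem.Dict.getD d n PySem.Set.empty).foldl (fun b2 g => PySem.Set.add b2 g) b)
      = (fun b n => PySem.Set.update b (PySem.Dict.getD d n PySem.Set.empty)) := rfl
  rw [hfun]
  exact mem_foldl_update _ notes b0 j

-- membership after B's index update
theorem mem_dUpdate (notes : List Int) (i : Nat) (d : PySem.Dict Int (PySem.Set Nat)) (m : Int) (j : Nat) :
    (j ∈ PySem.Dict.getD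
        (notes.foldl (fun dd n =>
          PySem.Dict.insert dd n (PySem.Set.union (PySem.Dict.getD dd n PySem.Set.empty) [i])) d)
        m PySem.Set.empty) ↔
      j ∈ PySem.Dict.getD d m PySem.Set.empty ∨ (m ∈ notes ∧ j = i) := by
  induction notes generalizing d with
  | nil => simp
  | cons n rest ih =>
    simp only [List.foldl_cons, ih, PySem.Dict.getD_insert, List.mem_cons]
    by_cases hm : m = n <;>
      simp only [hm, if_true, if_false, PySem.Set.mem_union,
        List.mem_singleton] <;> tauto

theorem pvFlatNotes_snoc (g : List (List Int × String × Int)) (p : List Int × String × Int) :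
    pvFlatNotes (g ++ [p]) = pvFlatNotes g ++ p.1 := by
  simp [pvFlatNotes]

-- find? over range(n+1) returns the minimal free index
theorem find?_range_eq (free : Nat → Bool) (n k : Nat) (hk : k ≤ n) (hfree : free k = true)
    (hmin : ∀ j, j < k → free j = false) :
    (List.range (n + 1)).find? free = some k := by
  have hsplit : List.range (n + 1) = List.range k ++ List.range' k (n + 1 - k) := by
    have h := @List.range'_append 0 k (n + 1 - k) 1
    simp only [Nat.one_mul, Nat.zero_add] at h
    have h2 : k + (n + 1 - k) = n + 1 := by omega
    rw [h2] at h
    rw [List.range_eq_range', ← h, List.range_eq_range']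
  have hnone : (List.range k).find? free = none := by
    rw [List.find?_eq_none]
    intro j hj
    simp only [List.mem_range] at hj
    simp [hmin j hj]
  have hcons : List.range' k (n + 1 - k) = k :: List.range' (k + 1) (n - k) := by
    have h1 : n + 1 - k = (n - k) + 1 := by omega
    rw [h1, List.range'_succ]
  rw [hsplit, List.find?_append, hnone, Option.none_or, hcons, List.find?_cons_of_pos hfree]

-- one step of A, as written in the port
def pvStepA (result : List (List (List Int × String × Int))) (p : List Int × String × Int) :
    List (List (List Int × String × Int)) :=
  if result.length > 0 then
    match pvTryPlaceA p result with
    | some r => r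
    | none => result ++ [[p]]
  else result ++ [[p]]

-- one step of B, as written in the port
def pvStepB (st : List (List (List Int × String × Int)) × PySem.Dict Int (PySem.Set Nat))
    (p : List Int × String × Int) :
    List (List (List Int × String × Int)) × PySem.Dict Int (PySem.Set Nat) :=
  let result := st.1
  let d := st.2
  let notes := p.1
  let blocked : PySem.Set Nat :=
    notes.foldl (fun b n =>
      (PySem.Dict.getD d n PySem.Set.empty).foldl (fun b2 g => PySem.Set.add b2 g) b)
      PySem.Set.empty
  let i := ((List.range (result.length + 1)).find?
              (fun j => !(PySem.Set.contains blocked j))).getD result.length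
  let result' := if i < result.length then result.modify i (fun g => g ++ [p]) else result ++ [[p]]
  let d' := notes.foldl
      (fun dd n => PySem.Dict.insert dd n (PySem.Set.union (PySem.Dict.getD dd n PySem.Set.empty) [i])) d
  (result', d')

-- B's chosen index is A's first fitting index
theorem stepB_index (res : List (List (List Int × String × Int))) (d : PySem.Dict Int (PySem.Set Nat))
    (p : List Int × String × Int) (hinv : pvInv d res) :
    (((List.range (res.length + 1)).find?
        (fun j => !(PySem.Set.contains
          (p.1.foldl (fun b n =>
            (PySem.Dict.getD d n PySem.Set.empty).foldl (fun b2 g => PySem.Set.add b2 g) b)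
            PySem.Set.empty) j))).getD res.length) = pvFF p res := by
  set free : Nat → Bool := fun j => !(PySem.Set.contains
          (p.1.foldl (fun b n =>
            (PySem.Dict.getD d n PySem.Set.empty).foldl (fun b2 g => PySem.Set.add b2 g) b)
            PySem.Set.empty) j) with hfree_def
  have hfree_iff : ∀ j, free j = true ↔
      ¬ ∃ n ∈ p.1, ∃ h : j < res.length, n ∈ pvFlatNotes (res[j]'h) := by
    intro j
    rw [hfree_def]
    simp only [Bool.not_eq_eq_eq_not, Bool.not_true, ← Bool.not_eq_true]
    rw [not_iff_not, PySem.Set.contains_iff, mem_blocked]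
    simp only [PySem.Set.empty, List.not_mem_nil, false_or]
    constructor
    · rintro ⟨n, hn, hj⟩
      exact ⟨n, hn, (hinv n j).mp hj⟩
    · rintro ⟨n, hn, hj⟩
      exact ⟨n, hn, (hinv n j).mpr hj⟩
  have hk := pvFF_le p res
  have hfk : free (pvFF p res) = true := by
    rw [hfree_iff]
    rintro ⟨n, hn, hlt, hmem⟩
    have hfit := pvFF_fits p res hlt
    simp only [pvFits, List.all_eq_true] at hfit
    have := hfit n hn
    rw [Bool.not_eq_eq_eq_not, Bool.not_true, ← Bool.not_eq_true, List.contains_iff_mem] at this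
    exact this hmem
  have hmn : ∀ j, j < pvFF p res → free j = false := by
    intro j hj
    have hjl : j < res.length := lt_of_lt_of_le hj hk
    have hfit := pvFF_min p res j hj hjl
    simp only [pvFits, List.all_eq_false] at hfit
    obtain ⟨n, hn, hcont⟩ := hfit
    rw [Bool.not_eq_eq_eq_not, Bool.not_true, Bool.not_eq_false, List.contains_iff_mem] at hcont
    rw [← Bool.not_eq_true, hfree_iff, not_not]
    exact ⟨n, hn, hjl, hcont⟩
  rw [find?_range_eq free res.length (pvFF p res) hk hfk hmn]
  rfl

theorem step_eq (res : List (List (List Int × String × Int))) (d : PySem.Dict Int (PySem.Set Nat))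
    (p : List Int × String × Int) (hinv : pvInv d res) :
    pvStepA res p = (pvStepB (res, d) p).1 ∧ pvInv (pvStepB (res, d) p).2 (pvStepB (res, d) p).1 := by
  have hidx := stepB_index res d p hinv
  have hk := pvFF_le p res
  set k := pvFF p res with hkdef
  have hB1 : (pvStepB (res, d) p).1 =
      (if k < res.length then res.modify k (fun g => g ++ [p]) else res ++ [[p]]) := by
    simp only [pvStepB, hidx]
  have hA : pvStepA res p =
      (if k < res.length then res.modify k (fun g => g ++ [p]) else res ++ [[p]]) := by
    unfold pvStepA
    rw [tryPlaceA_eq, ← hkdef]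
    by_cases h : k < res.length
    · have hres : res.length > 0 := by omega
      simp [hres, h]
    · by_cases hres : res.length > 0 <;> simp [hres, h]
  refine ⟨hA.trans hB1.symm, ?_⟩
  have hB2 : (pvStepB (res, d) p).2 = p.1.foldl
      (fun dd n => PySem.Dict.insert dd n (PySem.Set.union (PySem.Dict.getD dd n PySem.Set.empty) [k])) d := by
    simp only [pvStepB, hidx]
  intro n j
  rw [hB1, hB2, mem_dUpdate]
  by_cases h : k < res.length
  · rw [if_pos h]
    have hlen : (res.modify k fun g => g ++ [p]).length = res.length := by simp
    constructor
    · rintro (hj | ⟨hn, rfl⟩)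
      · obtain ⟨hjl, hmem⟩ := (hinv n j).mp hj
        refine ⟨by rwa [hlen], ?_⟩
        rw [List.getElem_modify]
        by_cases hji : k = j
        · rw [if_pos hji, pvFlatNotes_snoc]
          exact List.mem_append_left _ hmem
        · rw [if_neg hji]
          exact hmem
      · refine ⟨by rwa [hlen], ?_⟩
        rw [List.getElem_modify, if_pos rfl, pvFlatNotes_snoc]
        exact List.mem_append_right _ hn
    · rintro ⟨hjl, hmem⟩
      have hjl' : j < res.length := by rwa [hlen] at hjl
      rw [List.getElem_modify] at hmem
      by_cases hji : k = j
      · rw [if_pos hji, pvFlatNotes_snoc] at hmem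
        rcases List.mem_append.mp hmem with hmem | hmem
        · exact Or.inl ((hinv n j).mpr ⟨hjl', hmem⟩)
        · exact Or.inr ⟨hmem, hji.symm⟩
      · rw [if_neg hji] at hmem
        exact Or.inl ((hinv n j).mpr ⟨hjl', hmem⟩)
  · have hkeq : res.length = k := by omega
    rw [if_neg h]
    constructor
    · rintro (hj | ⟨hn, rfl⟩)
      · obtain ⟨hjl, hmem⟩ := (hinv n j).mp hj
        refine ⟨by simp; omega, ?_⟩
        rw [List.getElem_append_left hjl]
        exact hmem
      · refine ⟨by simp; omega, ?_⟩
        rw [List.getElem_append_right (by omega)]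
        have hz : k - res.length = 0 := by omega
        simp only [hz, List.getElem_cons_zero]
        simpa [pvFlatNotes] using hn
    · rintro ⟨hjl, hmem⟩
      have hjlen : j < res.length + 1 := by simpa using hjl
      by_cases hji : j < res.length
      · rw [List.getElem_append_left hji] at hmem
        exact Or.inl ((hinv n j).mpr ⟨hji, hmem⟩)
      · have hje : j = res.length := by omega
        subst hje
        rw [List.getElem_append_right (by omega)] at hmem
        simp only [Nat.sub_self, List.getElem_cons_zero] at hmem
        have hn : n ∈ p.1 := by simpa [pvFlatNotes] using hmem
        exact Or.inr ⟨hn, hkeq⟩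

theorem foldl_eq (l : List (List Int × String × Int)) (res : List (List (List Int × String × Int)))
    (d : PySem.Dict Int (PySem.Set Nat)) (hinv : pvInv d res) :
    l.foldl pvStepA res = (l.foldl pvStepB (res, d)).1 := by
  induction l generalizing res d with
  | nil => rfl
  | cons p rest ih =>
    obtain ⟨heq, hinv'⟩ := step_eq res d p hinv
    simp only [List.foldl_cons, heq]
    have := ih (pvStepB (res, d) p).1 (pvStepB (res, d) p).2 hinv'
    simpa using this

-- ===== VERDICT (by name: the statement is the Claim_ definition above) =====
theorem divide_patterns_spec : Claim_equal_divide_patterns := by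
  intro patterns _
  unfold Spec_divide_patterns divide_patterns divide_patterns_alt
  have h0 : pvInv PySem.Dict.empty [] := by
    intro n j
    simp [PySem.Dict.getD, PySem.Dict.get?, PySem.Dict.empty, PySem.Set.empty]
  exact foldl_eq _ [] PySem.Dict.empty h0
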